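-- pv_equiv track=rewrite | github.com/AuritroSaha/auritro_coding_portfolio | COMPETITIONS/non-transitiveDice.py | beats
-- ===== SOURCE A (Python) =====
-- def beats(d1, d2):
--     d1w = 0
--     d2w = 0
--     for i1 in d1:
--         for j in d2:
--             if i1 > j:
--                 d1w += 1
--             elif j > i1:
--                 d2w += 1
--
--     return d1w > d2w
-- ===== SOURCE B (Python) =====
-- def _part(s, ok):
--     # first index in sorted list s at which ok stops holding (ok is downward-closed)
--     lo, hi = 0, len(s)
--     while lo < hi:
--         mid = (lo + hi) // 2
--         if ok(s[mid]):
--             lo = mid + 1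
--         else:
--             hi = mid
--     return lo
--
--
-- def beats(d1, d2):
--     s = sorted(d2)
--     m = len(s)
--     net = 0
--     for x in d1:
--         net += _part(s, lambda v: v < x) - (m - _part(s, lambda v: v <= x))
--     return net > 0
-- ===== Notes on version B (the rewrite author's own statement) =====
-- stated objective: faster
-- what changed: B sorts d2 once and replaces A's inner scan by two binary searches per d1 element, accumulating the single net difference lt-gt instead of two counters.
import Mathlib
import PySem

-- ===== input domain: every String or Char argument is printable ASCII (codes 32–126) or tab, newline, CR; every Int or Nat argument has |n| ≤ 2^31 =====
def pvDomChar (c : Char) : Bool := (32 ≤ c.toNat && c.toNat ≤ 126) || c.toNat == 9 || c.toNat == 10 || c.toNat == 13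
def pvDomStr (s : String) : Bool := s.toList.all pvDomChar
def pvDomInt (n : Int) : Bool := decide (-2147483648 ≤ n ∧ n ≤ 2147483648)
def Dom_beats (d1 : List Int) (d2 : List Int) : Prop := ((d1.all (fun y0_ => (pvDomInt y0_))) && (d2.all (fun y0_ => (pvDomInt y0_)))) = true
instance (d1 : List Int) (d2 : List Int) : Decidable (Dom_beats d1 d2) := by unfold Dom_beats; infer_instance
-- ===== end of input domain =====

-- B replaces A's inner scan of d2 by sorting d2 once and doing two hand-written
-- binary searches per d1 element, accumulating the single net difference; faster.

-- ===== PORT A =====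
def beats (d1 : List Int) (d2 : List Int) : Bool :=
  let st := d1.foldl (fun (w : Int × Int) i1 =>
    d2.foldl (fun (w : Int × Int) j =>
      if i1 > j then (w.1 + 1, w.2)
      else if j > i1 then (w.1, w.2 + 1)
      else w) w) (0, 0)
  decide (st.1 > st.2)

-- ===== PORT B =====
-- while lo < hi binary search of Source B's _part; s[mid] is always in range (0 ≤ lo ≤ mid < hi ≤ len s), so getD is exact
def pvPart (s : List Int) (ok : Int → Bool) (lo hi : Nat) : Nat :=
  if _h : lo < hi then
    let mid := (lo + hi) / 2
    if ok (s.getD mid 0) then pvPart s ok (mid + 1) hi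
    else pvPart s ok lo mid
  else lo
termination_by hi - lo
decreasing_by all_goals omega

def beats_alt (d1 : List Int) (d2 : List Int) : Bool :=
  let s := PySem.List.sorted d2 (fun v => v) false
  let m := s.length
  let net := d1.foldl (fun (net : Int) x =>
    net + ((pvPart s (fun v => decide (v < x)) 0 m : Int)
            - ((m : Int) - (pvPart s (fun v => decide (v ≤ x)) 0 m : Int)))) 0
  decide (net > 0)

-- ===== PRECONDITION & SPEC =====
def Spec_beats (d1 : List Int) (d2 : List Int) (out : Bool) : Prop := out = beats_alt d1 d2
instance (d1 : List Int) (d2 : List Int) (out : Bool) : Decidable (Spec_beats d1 d2 out) := by unfold Spec_beats; infer_instance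

-- ===== CLAIM (what is proved, stated in full; the proofs are below) =====
def Claim_equal_beats : Prop := ∀ (d1 : List Int) (d2 : List Int), Dom_beats d1 d2 → Spec_beats d1 d2 (beats d1 d2)

-- ===== LEMMAS AND PROOFS =====

-- binary-search invariant: with ok downward-closed along s, pvPart returns a split point
theorem pvPart_split (s : List Int) (ok : Int → Bool)
    (hmono : ∀ i j : Nat, i ≤ j → j < s.length → ok (s.getD j 0) = true → ok (s.getD i 0) = true)
    (lo hi : Nat) :
    lo ≤ hi → hi ≤ s.length →
    (∀ i : Nat, i < lo → ok (s.getD i 0) = true) →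
    (∀ i : Nat, hi ≤ i → i < s.length → ok (s.getD i 0) = false) →
    (∀ i : Nat, i < pvPart s ok lo hi → ok (s.getD i 0) = true) ∧
    (∀ i : Nat, pvPart s ok lo hi ≤ i → i < s.length → ok (s.getD i 0) = false) ∧
    pvPart s ok lo hi ≤ s.length := by
  induction lo, hi using pvPart.induct s ok with
  | case1 lo hi h mid hok ih =>
    intro hlh hhl hlow hhigh
    rw [pvPart]
    simp only [h, dif_pos]
    rw [if_pos hok]
    exact ih (by simp only [mid]; omega) hhl
      (fun i hi' => hmono i mid (by simp only [mid] at *; omega) (by simp only [mid] at *; omega) hok)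
      hhigh
  | case2 lo hi h mid hok ih =>
    intro hlh hhl hlow hhigh
    rw [pvPart]
    simp only [h, dif_pos]
    rw [if_neg hok]
    refine ih (by simp only [mid]; omega) (by simp only [mid] at *; omega) hlow ?_
    intro i hmi hil
    by_contra hc
    simp only [Bool.not_eq_false] at hc
    exact hok (hmono mid i hmi hil hc)
  | case3 lo hi h =>
    intro hlh hhl hlow hhigh
    rw [pvPart]
    simp only [h, dif_neg, not_false_eq_true]
    exact ⟨hlow, fun i hri hil => hhigh i (by omega) hil, by omega⟩

-- a split point of a predicate along a list counts exactly the prefix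
theorem countP_of_split (ok : Int → Bool) :
    ∀ (s : List Int) (r : Nat), r ≤ s.length →
    (∀ i : Nat, i < r → ok (s.getD i 0) = true) →
    (∀ i : Nat, r ≤ i → i < s.length → ok (s.getD i 0) = false) →
    s.countP ok = r := by
  intro s
  induction s with
  | nil => intro r hr _ _; simp at hr; simp [hr]
  | cons a t iht =>
    intro r hr hlow hhigh
    have hsh : ∀ (i : Nat), ((a :: t).getD (i + 1) 0) = t.getD i 0 := by
      intro i; simp [List.getD]
    cases r with
    | zero =>
      have ha : ok a = false := hhigh 0 (Nat.zero_le 0) (by simp)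
      have ht : t.countP ok = 0 :=
        iht 0 (Nat.zero_le _) (fun i hi0 => absurd hi0 (Nat.not_lt_zero i))
          (fun i _ hil => by
            rw [← hsh i]
            exact hhigh (i + 1) (Nat.zero_le _) (by simp only [List.length_cons]; omega))
      simp [ha, ht]
    | succ r' =>
      have ha : ok a = true := hlow 0 (by omega)
      simp only [List.length_cons] at hr
      have ht : t.countP ok = r' := iht r' (by omega)
        (fun i hir => by rw [← hsh i]; exact hlow (i + 1) (by omega))
        (fun i hri hil => by
          rw [← hsh i]
          exact hhigh (i + 1) (by omega) (by simp only [List.length_cons]; omega))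
      simp [ha, ht]

theorem pvPart_sorted_countP (d2 : List Int) (ok : Int → Bool)
    (hdc : ∀ a b : Int, a ≤ b → ok b = true → ok a = true) :
    pvPart (PySem.List.sorted d2 (fun v => v) false) ok 0 (PySem.List.sorted d2 (fun v => v) false).length
      = d2.countP ok := by
  set s := PySem.List.sorted d2 (fun v => v) false with hs
  have hmono : ∀ i j : Nat, i ≤ j → j < s.length → ok (s.getD j 0) = true → ok (s.getD i 0) = true := by
    intro i j hij hjl hokj
    have hil : i < s.length := by omega
    rw [List.getD_eq_getElem s 0 hil]
    rw [List.getD_eq_getElem s 0 hjl] at hokj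
    exact hdc _ _ (PySem.List.sorted_id_getElem_mono d2 hij hjl) hokj
  obtain ⟨h1, h2, h3⟩ := pvPart_split s ok hmono 0 s.length (by omega) (le_refl _)
    (by omega) (by omega)
  have hcount := countP_of_split ok s _ h3 h1 h2
  rw [← hcount]
  exact (PySem.List.sorted_perm d2 (fun v => v) false).countP_eq ok

-- A's inner loop over d2 adds the two comparison counts
theorem innerA (i1 : Int) (d2 : List Int) : ∀ w : Int × Int,
    d2.foldl (fun (w : Int × Int) j =>
      if i1 > j then (w.1 + 1, w.2)
      else if j > i1 then (w.1, w.2 + 1)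
      else w) w
    = (w.1 + (d2.countP (fun j => decide (j < i1)) : Int),
       w.2 + (d2.countP (fun j => decide (i1 < j)) : Int)) := by
  induction d2 with
  | nil => simp
  | cons j t iht =>
    intro w
    simp only [List.foldl_cons, List.countP_cons]
    rcases lt_trichotomy j i1 with h | h | h
    · have h1 : i1 > j := h
      have h2 : ¬ j > i1 := by omega
      simp only [h1, if_pos, iht]
      simp [h2]
      all_goals ring
    · subst h
      simp [iht]
    · have h2 : ¬ i1 > j := by omega
      simp only [h2, if_neg, not_false_eq_true, h, gt_iff_lt, if_pos, iht]
      simp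
      all_goals ring

-- A's outer loop sums those counts
theorem outerA (d2 : List Int) : ∀ (d1 : List Int) (w : Int × Int),
    d1.foldl (fun (w : Int × Int) i1 =>
      d2.foldl (fun (w : Int × Int) j =>
        if i1 > j then (w.1 + 1, w.2)
        else if j > i1 then (w.1, w.2 + 1)
        else w) w) w
    = (w.1 + (d1.map (fun x => (d2.countP (fun j => decide (j < x)) : Int))).sum,
       w.2 + (d1.map (fun x => (d2.countP (fun j => decide (x < j)) : Int))).sum) := by
  intro d1
  induction d1 with
  | nil => simp
  | cons x t iht =>
    intro w
    rw [List.foldl_cons, innerA, iht]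
    simp only [List.map_cons, List.sum_cons, Prod.mk.injEq]
    constructor <;> ring

-- B's loop sums the per-element net contributions
theorem foldB (c : Int → Int) : ∀ (d1 : List Int) (n : Int),
    d1.foldl (fun (n : Int) x => n + c x) n = n + (d1.map c).sum := by
  intro d1
  induction d1 with
  | nil => simp
  | cons x t iht => intro n; simp only [List.foldl_cons, iht, List.map_cons, List.sum_cons]; ring

theorem count_le_complement (x : Int) (d2 : List Int) :
    (d2.countP (fun j => decide (x < j)) : Int)
      = (d2.length : Int) - (d2.countP (fun j => decide (j ≤ x)) : Int) := by
  have h := List.length_eq_countP_add_countP (l := d2) (p := fun j => decide (j ≤ x))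
  have he : d2.countP (fun a => decide ¬(decide (a ≤ x) = true)) = d2.countP (fun j => decide (x < j)) := by
    apply List.countP_congr
    intro a _
    simp only [decide_eq_true_eq]
    omega
  rw [he] at h
  omega

theorem sum_map_sub (c1 c2 : Int → Int) : ∀ d1 : List Int,
    (d1.map (fun x => c1 x - c2 x)).sum = (d1.map c1).sum - (d1.map c2).sum := by
  intro d1
  induction d1 with
  | nil => simp
  | cons x t iht => simp only [List.map_cons, List.sum_cons, iht]; ring

-- ===== VERDICT (by name: the statement is the Claim_ definition above) =====
theorem beats_spec : Claim_equal_beats := by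
  intro d1 d2 _
  unfold Spec_beats beats beats_alt
  simp only [outerA]
  have hlt : ∀ x : Int,
      pvPart (PySem.List.sorted d2 (fun v => v) false) (fun v => decide (v < x)) 0
        (PySem.List.sorted d2 (fun v => v) false).length = d2.countP (fun v => decide (v < x)) := by
    intro x
    exact pvPart_sorted_countP d2 _ (fun a b hab hb => by simp at *; omega)
  have hle : ∀ x : Int,
      pvPart (PySem.List.sorted d2 (fun v => v) false) (fun v => decide (v ≤ x)) 0
        (PySem.List.sorted d2 (fun v => v) false).length = d2.countP (fun v => decide (v ≤ x)) := by
    intro x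
    exact pvPart_sorted_countP d2 _ (by intro a b hab hb; simp at *; omega)
  simp only [PySem.List.length_sorted] at hlt hle
  simp only [PySem.List.length_sorted, hlt, hle]
  rw [foldB (fun x => (d2.countP (fun v => decide (v < x)) : Int)
    - ((d2.length : Int) - (d2.countP (fun v => decide (v ≤ x)) : Int)))]
  simp only [zero_add]
  have : ∀ x : Int, (d2.countP (fun v => decide (v < x)) : Int)
      - ((d2.length : Int) - (d2.countP (fun v => decide (v ≤ x)) : Int))
      = (d2.countP (fun j => decide (j < x)) : Int) - (d2.countP (fun j => decide (x < j)) : Int) := by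
    intro x
    rw [count_le_complement]
  simp only [this, sum_map_sub]
  simp only [gt_iff_lt, decide_eq_decide]
  omega
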